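-- pv_equiv track=rewrite | github.com/weiyangzen/awesome_algorithms | Algorithms/物理-热力学-0281-热力学第零定律_(Zeroth_Law_of_Thermodynamics)/demo.py | verify_zeroth_transitivity
-- ===== SOURCE A (Python) =====
-- import itertools
--
-- def verify_zeroth_transitivity(body_to_class: dict[str, str]) -> int:
--     """Check: if A~C and B~C then A~B, under inferred relation."""
--     names = sorted(body_to_class)
--     triples_checked = 0
--
--     def rel(x: str, y: str) -> bool:
--         return body_to_class[x] == body_to_class[y]
--
--     for c in names:
--         eq_with_c = [x for x in names if x != c and rel(x, c)]
--         if len(eq_with_c) < 2: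
--             continue
--         for a, b in itertools.combinations(eq_with_c, 2):
--             assert rel(a, b), f"Transitivity failed for triple ({a}, {b}, {c})"
--             triples_checked += 1
--
--     return triples_checked
-- ===== SOURCE B (Python) =====
-- from collections import Counter
--
-- def verify_zeroth_transitivity(body_to_class: dict[str, str]) -> int:
--     """Check: if A~C and B~C then A~B, under inferred relation."""
--     counts = Counter(body_to_class.values())
--     return sum(m * (m - 1) * (m - 2) // 2 for m in counts.values())
-- ===== Notes on version B (the rewrite author's own statement) =====
-- stated objective: faster
-- what changed: B replaces A's loop over every name c with an inner pair enumeration of c's equivalence class by a single Counter over the class labels, returning the closed-form sum of m*(m-1)*(m-2)//2 over the class sizes m.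
import Mathlib
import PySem

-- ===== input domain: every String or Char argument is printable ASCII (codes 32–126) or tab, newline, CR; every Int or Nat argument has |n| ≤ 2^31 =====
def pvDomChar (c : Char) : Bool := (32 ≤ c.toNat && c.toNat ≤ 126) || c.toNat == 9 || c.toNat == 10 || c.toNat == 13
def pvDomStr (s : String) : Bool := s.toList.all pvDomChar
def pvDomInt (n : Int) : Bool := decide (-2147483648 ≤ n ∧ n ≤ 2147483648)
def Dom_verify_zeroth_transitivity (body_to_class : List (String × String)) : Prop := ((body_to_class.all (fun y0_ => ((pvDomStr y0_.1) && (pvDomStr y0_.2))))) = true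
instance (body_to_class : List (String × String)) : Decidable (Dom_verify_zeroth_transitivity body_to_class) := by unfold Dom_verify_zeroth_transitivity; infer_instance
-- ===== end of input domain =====

-- B replaces A's cubic scan over key triples by counting class sizes once and summing
-- m*(m-1)*(m-2)/2 per class (same value; asymptotically faster).

-- ===== PORT A =====
-- itertools.combinations(l, 2), in itertools order
def pvCombPairs (l : List String) : List (String × String) :=
  match l with
  | [] => []
  | x :: xs => xs.map (fun y => (x, y)) ++ pvCombPairs xs

-- Port of A. The dict parameter arrives as an association list; PySem.Dict.ofList gives it
-- Python-dict semantics. body_to_class[x] is looked up only at x ∈ names = keys, so getD is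
-- exact (no KeyError). The `assert rel(a, b)` can never fire: rel is equality of lookups, so
-- any two names equal-related to c are equal-related to each other; the loop body is a count.
def verify_zeroth_transitivity (body_to_class : List (String × String)) : Int :=
  let d := PySem.Dict.ofList body_to_class
  let names := PySem.List.sorted d.keys (fun x => x) false
  names.foldl (fun acc c =>
    let eq_with_c := names.filter (fun x => x != c && (d.getD x "" == d.getD c ""))
    if eq_with_c.length < 2 then acc
    else (pvCombPairs eq_with_c).foldl (fun t _ => t + 1) acc) 0

-- ===== PORT B =====
def verify_zeroth_transitivity_alt (body_to_class : List (String × String)) : Int :=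
  let counts := PySem.Dict.counter (PySem.Dict.ofList body_to_class).values
  (counts.values.map (fun m => PySem.Int.floordiv (m * (m - 1) * (m - 2)) 2)).sum

-- ===== PRECONDITION & SPEC =====
def Spec_verify_zeroth_transitivity (body_to_class : List (String × String)) (out : Int) : Prop := out = verify_zeroth_transitivity_alt body_to_class
instance (body_to_class : List (String × String)) (out : Int) : Decidable (Spec_verify_zeroth_transitivity body_to_class out) := by unfold Spec_verify_zeroth_transitivity; infer_instance

-- ===== CLAIM (what is proved, stated in full; the proofs are below) =====
def Claim_equal_verify_zeroth_transitivity : Prop := ∀ (body_to_class : List (String × String)), Dom_verify_zeroth_transitivity body_to_class → Spec_verify_zeroth_transitivity body_to_class (verify_zeroth_transitivity body_to_class)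

-- ===== LEMMAS AND PROOFS =====

-- (pvCombPairs l).length = C(|l|, 2)
lemma pvCombPairs_length (l : List String) : (pvCombPairs l).length = l.length.choose 2 := by
  induction l with
  | nil => rfl
  | cons x xs ih =>
      simp [pvCombPairs, ih, Nat.choose_succ_succ, Nat.choose_one_right]

-- counting foldl adds the length
lemma pv_foldl_count_one (l : List (String × String)) (a : Int) :
    l.foldl (fun t _ => t + 1) a = a + l.length := by
  induction l generalizing a with
  | nil => simp
  | cons x xs ih => simp [List.foldl_cons, ih]; ring

-- dropping the one occurrence of c from a filter over a Nodup list
lemma pv_filter_ne_length (l : List String) (p : String → Bool) (c : String)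
    (hnd : l.Nodup) (hc : c ∈ l) (hpc : p c = true) :
    (l.filter (fun x => x != c && p x)).length + 1 = (l.filter p).length := by
  induction l with
  | nil => cases hc
  | cons a t ih =>
      rcases List.nodup_cons.mp hnd with ⟨ha, ht⟩
      by_cases hac : a = c
      · subst hac
        have hft : t.filter (fun x => x != a && p x) = t.filter p := by
          apply List.filter_congr
          intro x hx
          have hxa : x ≠ a := fun h => ha (h ▸ hx)
          simp [hxa]
        simp [hpc, hft]
      · have hct : c ∈ t := by
          rcases hc with _ | h
          · exact absurd rfl hac
          · assumption
        have hbne : (a != c) = true := by simp [hac]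
        by_cases hpa : p a = true
        · simp [hpa, hbne, ih ht hct]
        · simp at hpa
          simp [hpa, hbne, ih ht hct]

-- the per-class closed form: m copies of C(m-1,2) sum to m(m-1)(m-2)//2
lemma pv_pointwise (m : Nat) :
    m • ((((m - 1).choose 2 : Nat)) : Int)
      = PySem.Int.floordiv ((m : Int) * ((m : Int) - 1) * ((m : Int) - 2)) 2 := by
  match m with
  | 0 => decide
  | 1 => decide
  | (k+2) =>
      have h2 : 2 ∣ (k+1) * k := by
        rcases Nat.even_mul_succ_self k with ⟨j, hj⟩
        exact ⟨j, by rw [mul_comm]; omega⟩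
      have h1 : 2 * ((k+1).choose 2) = (k+1) * k := by
        rw [Nat.choose_two_right]
        show 2 * ((k+1) * k / 2) = (k+1) * k
        exact Nat.mul_div_cancel' h2
      have hA : ((k+2 : Nat) : Int) * (((k+2 : Nat) : Int) - 1) * (((k+2 : Nat) : Int) - 2)
          = (((k+2) * (2 * ((k+1).choose 2)) : Nat) : Int) := by
        rw [h1]; push_cast; ring
      rw [hA]
      have hfd := PySem.Int.floordiv_natCast ((k+2) * (2 * ((k+1).choose 2))) 2
      rw [show ((2:Nat) : Int) = (2 : Int) from rfl] at hfd
      rw [hfd]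
      have hdiv : (k+2) * (2 * ((k+1).choose 2)) / 2 = (k+2) * ((k+1).choose 2) := by
        rw [mul_left_comm]
        exact Nat.mul_div_cancel_left _ (by norm_num)
      rw [hdiv]
      have hm1 : (k + 2 - 1) = k + 1 := rfl
      rw [hm1, nsmul_eq_mul]
      norm_cast

-- ===== VERDICT (by name: the statement is the Claim_ definition above) =====
theorem verify_zeroth_transitivity_spec : Claim_equal_verify_zeroth_transitivity := by
  intro bt _hdom
  unfold Spec_verify_zeroth_transitivity
  simp only [verify_zeroth_transitivity, verify_zeroth_transitivity_alt]
  set d := PySem.Dict.ofList bt with hd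
  set names := PySem.List.sorted d.keys (fun x => x) false with hnamesdef
  have hkeysnd : d.keys.Nodup := PySem.Dict.nodup_keys_ofList bt
  have hperm : names.Perm d.keys := PySem.List.sorted_perm d.keys (fun x => x) false
  have hnd : names.Nodup := hperm.nodup_iff.mpr hkeysnd
  set vals := names.map (fun x => d.getD x "") with hvalsdef
  set vs' := d.values with hvsdef
  -- vals is a permutation of the dict's values
  have hvp : vals.Perm vs' := by
    rw [hvsdef, PySem.Dict.values_eq_map_keys d hkeysnd ""]
    exact hperm.map _
  -- counting names in the class of c = counting the class value in vals
  have hcnt : ∀ c : String,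
      (names.filter (fun x => d.getD x "" == d.getD c "")).length
        = vals.count (d.getD c "") := by
    intro c
    rw [hvalsdef]
    simp only [List.count_eq_countP, List.countP_eq_length_filter]
    rw [List.filter_map]
    simp [Function.comp_def]
  -- LHS: the per-name loop body is acc + C(count - 1, 2)
  have hstep : ∀ (acc : Int), ∀ c ∈ names,
      (fun acc c =>
        if (names.filter (fun x => x != c && (d.getD x "" == d.getD c "" : Bool))).length < 2
        then acc
        else (pvCombPairs (names.filter (fun x => x != c && (d.getD x "" == d.getD c "" : Bool)))).foldl
          (fun t _ => t + 1) acc) acc c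
      = acc + (((vals.count (d.getD c "") - 1).choose 2 : Nat) : Int) := by
    intro acc c hc
    beta_reduce
    have hpc : (fun x : String => (d.getD x "" == d.getD c "" : Bool)) c = true := by simp
    have hflt := pv_filter_ne_length names (fun x => (d.getD x "" == d.getD c "" : Bool)) c hnd hc hpc
    rw [hcnt c] at hflt
    beta_reduce at hflt
    by_cases hlt : (names.filter (fun x => x != c && (d.getD x "" == d.getD c "" : Bool))).length < 2
    · rw [if_pos hlt]
      have h0 : (vals.count (d.getD c "") - 1).choose 2 = 0 :=
        Nat.choose_eq_zero_of_lt (by omega)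
      simp [h0]
    · rw [if_neg hlt, pv_foldl_count_one, pvCombPairs_length]
      have : (names.filter (fun x => x != c && (d.getD x "" == d.getD c "" : Bool))).length
          = vals.count (d.getD c "") - 1 := by omega
      rw [this]
  rw [PySem.List.foldl_congr_mem names _
    (fun acc c => acc + (((vals.count (d.getD c "") - 1).choose 2 : Nat) : Int)) 0 hstep]
  rw [PySem.List.foldl_add names
    (fun c => (((vals.count (d.getD c "") - 1).choose 2 : Nat) : Int)) 0, zero_add]
  -- RHS: Counter(values).values() lists each class's multiplicity once
  have hBv : (PySem.Dict.counter vs').values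
      = (PySem.Set.ofList vs').map (fun k => ((vs'.count k : Nat) : Int)) := by
    simp only [PySem.Dict.values, PySem.Dict.items_counter, List.map_map]
    rfl
  rw [hBv, List.map_map]
  -- both sides as Finset sums over the distinct values
  have hfs : (PySem.Set.ofList vs').toFinset = vs'.toFinset := by
    ext x; simp [PySem.Set.mem_ofList]
  rw [← List.sum_toFinset _ (PySem.Set.nodup_ofList vs'), hfs]
  have hL : (names.map (fun c => (((vals.count (d.getD c "") - 1).choose 2 : Nat) : Int))).sum
      = ∑ v ∈ vals.toFinset, vals.count v • (((vals.count v - 1).choose 2 : Nat) : Int) := by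
    have hmm := Finset.sum_multiset_map_count (↑vals)
      (fun v => (((vals.count v - 1).choose 2 : Nat) : Int))
    have hmap : (names.map (fun c => (((vals.count (d.getD c "") - 1).choose 2 : Nat) : Int)))
        = vals.map (fun v => (((vals.count v - 1).choose 2 : Nat) : Int)) := by
      rw [hvalsdef, List.map_map]; rfl
    rw [hmap]
    simpa using hmm
  rw [hL, List.toFinset_eq_of_perm vals vs' hvp]
  apply Finset.sum_congr rfl
  intro v _
  rw [hvp.count_eq v]
  exact pv_pointwise (vs'.count v)
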